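-- pv_equiv track=rewrite | github.com/glhuilli/newvelles | newvelles/analysis/concepts_analysis.py | _enforce_openai_limits
-- ===== SOURCE A (Python) =====
-- from typing import Dict, Iterable, NamedTuple, List
--
-- def _enforce_openai_limits(titles: List[str], limit: int = 40000) -> List[str]:
--     """
--     Only keep the summaries that provide most information using limit as the upper bound to how many
--
--     Most information means
--     1. Has the most words post NLP processing
--
--     TODO: improve the notion of "most information".
--     """
--     final_titles = []
--     total = 0
--     titles.sort(key=lambda s: len(s.split()), reverse=True)
--     for t in titles:
--         if total > limit:
--             break
--         final_titles.append(t)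
--         total += len(t.split())
--     return final_titles
-- ===== SOURCE B (Python) =====
-- from typing import Dict, Iterable, NamedTuple, List
--
--
-- def _enforce_openai_limits(titles: List[str], limit: int = 40000) -> List[str]:
--     # Same in-place sort as the original (the caller observes the mutation).
--     titles.sort(key=lambda s: len(s.split()), reverse=True)
--     # Exclusive prefix-sum table of word counts, then a single filter pass:
--     # keep exactly the titles whose preceding cumulative word count is <= limit.
--     prefixes = []
--     acc = 0
--     for t in titles:
--         prefixes.append(acc)
--         acc += len(t.split())
--     return [t for t, p in zip(titles, prefixes) if p <= limit]
-- ===== Notes on version B (the rewrite author's own statement) =====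
-- stated objective: alternative
-- what changed: Replaces the running-accumulator loop with early break by an exclusive prefix-sum table plus a filter over zip(titles, prefixes); correctness of dropping the break relies on word counts being nonnegative, so later prefixes stay over the limit.
import Mathlib
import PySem

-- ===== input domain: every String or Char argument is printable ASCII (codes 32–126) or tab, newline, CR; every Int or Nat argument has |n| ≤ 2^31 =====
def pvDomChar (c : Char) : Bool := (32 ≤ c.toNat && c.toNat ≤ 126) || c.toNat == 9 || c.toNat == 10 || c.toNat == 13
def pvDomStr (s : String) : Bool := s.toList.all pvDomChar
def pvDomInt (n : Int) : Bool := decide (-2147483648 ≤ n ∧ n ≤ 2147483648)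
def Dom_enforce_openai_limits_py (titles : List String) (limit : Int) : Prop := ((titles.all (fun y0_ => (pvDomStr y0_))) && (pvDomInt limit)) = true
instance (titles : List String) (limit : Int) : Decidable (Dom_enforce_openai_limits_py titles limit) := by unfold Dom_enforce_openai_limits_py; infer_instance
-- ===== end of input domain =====

-- B replaces A's running-accumulator loop (with early break) by an exclusive prefix-sum
-- table plus one filter pass; equivalence is about the RETURN value (both versions perform
-- the same in-place sort of the argument in Python).

-- ===== PORT A =====
-- len(t.split()) — number of whitespace-separated words
def pvWords (t : String) : Int := ((PySem.Str.split₀ t).length : Int)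

-- the 'for t in titles: if total > limit: break; append; total += …' loop
def pvALoop (limit : Int) (total : Int) : List String → List String
  | [] => []
  | t :: rest => if total > limit then [] else t :: pvALoop limit (total + pvWords t) rest

def enforce_openai_limits_py (titles : List String) (limit : Int) : List String :=
  pvALoop limit 0 (PySem.List.sorted titles (fun s => pvWords s) true)

-- ===== PORT B =====
-- the 'prefixes.append(acc); acc += len(t.split())' loop: exclusive prefix sums
def pvPrefixes (acc : Int) : List String → List Int
  | [] => []
  | t :: rest => acc :: pvPrefixes (acc + pvWords t) rest

def enforce_openai_limits_py_alt (titles : List String) (limit : Int) : List String :=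
  let st := PySem.List.sorted titles (fun s => pvWords s) true
  (((st.zip (pvPrefixes 0 st)).filter (fun tp => tp.2 ≤ limit)).map Prod.fst)

-- ===== PRECONDITION & SPEC =====
def Spec_enforce_openai_limits_py (titles : List String) (limit : Int) (out : List String) : Prop := out = enforce_openai_limits_py_alt titles limit
instance (titles : List String) (limit : Int) (out : List String) : Decidable (Spec_enforce_openai_limits_py titles limit out) := by unfold Spec_enforce_openai_limits_py; infer_instance

-- ===== CLAIM (what is proved, stated in full; the proofs are below) =====
def Claim_equal_enforce_openai_limits_py : Prop := ∀ (titles : List String) (limit : Int), Dom_enforce_openai_limits_py titles limit → Spec_enforce_openai_limits_py titles limit (enforce_openai_limits_py titles limit)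

-- ===== LEMMAS AND PROOFS =====
theorem pvWords_nonneg (t : String) : 0 ≤ pvWords t := by
  simp [pvWords]

theorem pvPrefixes_ge (acc : Int) (ts : List String) :
    ∀ p ∈ pvPrefixes acc ts, acc ≤ p := by
  induction ts generalizing acc with
  | nil => simp [pvPrefixes]
  | cons t rest ih =>
    intro p hp
    simp only [pvPrefixes, List.mem_cons] at hp
    rcases hp with h | h
    · omega
    · have := ih (acc + pvWords t) p h
      have := pvWords_nonneg t
      omega

theorem pvLoop_eq_filter (limit : Int) (ts : List String) (total : Int) :
    pvALoop limit total ts =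
      ((ts.zip (pvPrefixes total ts)).filter (fun tp => tp.2 ≤ limit)).map Prod.fst := by
  induction ts generalizing total with
  | nil => simp [pvALoop, pvPrefixes]
  | cons t rest ih =>
    by_cases h : total > limit
    · have hzero :
          ((rest.zip (pvPrefixes (total + pvWords t) rest)).filter
            (fun tp => tp.2 ≤ limit)) = [] := by
        rw [List.filter_eq_nil_iff]
        intro tp htp
        have hmem : tp.2 ∈ pvPrefixes (total + pvWords t) rest :=
          (List.of_mem_zip htp).2
        have := pvPrefixes_ge (total + pvWords t) rest tp.2 hmem
        have := pvWords_nonneg t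
        simp only [decide_eq_true_eq]
        omega
      simp [pvALoop, pvPrefixes, h, hzero, not_le.mpr h]
    · rw [not_lt] at h
      simp [pvALoop, pvPrefixes, not_lt.mpr h, h, ih]

-- ===== VERDICT (by name: the statement is the Claim_ definition above) =====
theorem enforce_openai_limits_py_spec : Claim_equal_enforce_openai_limits_py := by
  intro titles limit _
  unfold Spec_enforce_openai_limits_py enforce_openai_limits_py enforce_openai_limits_py_alt
  exact pvLoop_eq_filter limit _ 0
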